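-- pv_equiv track=rewrite | github.com/AlgoZenithNITC/GFG_POTD_Solutions_AlgoZenithNITC | Sequence_of_Sequence.py | numberSequence
-- ===== SOURCE A (Python) =====
-- def numberSequence(m, n):
--    dp = [[0] * (n + 1) for _ in range(m + 1)]
--    for i in range(m + 1):
--        for j in range(n + 1):
--            if i == 0 or j == 0 or i < j:
--                dp[i][j] = 0
--            elif j == 1:
--                dp[i][j] = i
--            else:
--                dp[i][j] = dp[i - 1][j] + dp[i // 2][j - 1]
--    return dp[m][n]
-- ===== SOURCE B (Python) =====
-- # Top-down recursion on the column index: compute only the reachable prefix of each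
-- # column (arguments halve per level), instead of A's full (m+1)x(n+1) table fill.
-- def numberSequence(m, n):
--     if m <= 0 or n <= 0:
--         return 0
--     return _column(m, n)[m]
--
-- def _column(m, n):
--     # list of f(i, n) for i in 0..m, where f is the counted quantity
--     if m < n:
--         return [0] * (m + 1)
--     if n == 1:
--         return list(range(m + 1))
--     prev = _column(m >> 1, n - 1)
--     col = [0] * (m + 1)
--     for i in range(n, m + 1):
--         col[i] = col[i - 1] + prev[i >> 1]
--     return col
-- ===== Notes on version B (the rewrite author's own statement) =====
-- stated objective: faster
-- what changed: Replaces A's bottom-up fill of the full (m+1)x(n+1) table by a top-down recursion on the column index that computes only the reachable prefix of each column (arguments halve per level, so level j only needs i <= m/2^(n-j)), touching O(m) states instead of m*n.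
import Mathlib
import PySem

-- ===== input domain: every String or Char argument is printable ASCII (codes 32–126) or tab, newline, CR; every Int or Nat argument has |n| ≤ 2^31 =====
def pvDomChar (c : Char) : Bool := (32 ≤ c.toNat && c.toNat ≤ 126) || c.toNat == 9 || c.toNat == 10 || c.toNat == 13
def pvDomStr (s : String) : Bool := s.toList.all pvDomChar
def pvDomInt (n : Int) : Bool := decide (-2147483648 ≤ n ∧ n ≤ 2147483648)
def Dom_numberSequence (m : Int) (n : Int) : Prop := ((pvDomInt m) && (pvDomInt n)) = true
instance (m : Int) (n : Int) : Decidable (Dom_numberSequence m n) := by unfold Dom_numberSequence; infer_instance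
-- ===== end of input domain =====

-- B replaces A's full (m+1)x(n+1) bottom-up table fill by a top-down recursion on the
-- column index that computes only the reachable prefix of each column; faster (asymptotic).

-- ===== PORT A =====
-- One cell of A's table update: the three-way branch of A's inner loop body.
-- Under Pre_ all indices are in range, so the getD defaults are never consulted.
def pvCellA (dp : Array (Array Int)) (i j : Nat) : Int :=
  if i = 0 ∨ j = 0 ∨ i < j then 0
  else if j = 1 then (i : Int)
  else (dp.getD (i - 1) #[]).getD j 0 + (dp.getD (i / 2) #[]).getD (j - 1) 0

-- Literal port of A: build the zero table, fill it with the two nested loops, read dp[m][n].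
-- Python lists of ints are ported as Arrays (same O(1) indexed update dp[i][j] = v, here
-- dp.modify i (row.setIfInBounds j v), always in range under Pre_); loop indices of
-- range(m+1)/range(n+1) are nonnegative, so Nat ranges are exact under Pre_.
def numberSequence (m : Int) (n : Int) : Int :=
  (((List.range (m.toNat + 1)).foldl (fun dp i =>
      (List.range (n.toNat + 1)).foldl (fun dp j =>
          let v := pvCellA dp i j
          dp.modify i (fun row => row.setIfInBounds j v)) dp)
      (Array.replicate (m.toNat + 1) (Array.replicate (n.toNat + 1) (0 : Int)))).getD m.toNat #[]).getD n.toNat 0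

-- ===== PORT B =====
-- Literal port of B's helper _column: base cases m < n (all zeros) and n = 1 (identity),
-- otherwise recurse to column n-1 truncated at m >> 1 and fill indices n..m left to right.
-- Python lists are ported as Arrays (col[i] = v is setIfInBounds, reads are getD; all
-- indices are in range so the defaults are never consulted).
def pvColumnB (m : Nat) (n : Nat) : Array Int :=
  if n = 0 then #[]  -- unreachable totality guard: _column is only called with n ≥ 1
  else if m < n then Array.replicate (m + 1) 0
  else if n = 1 then (Array.range (m + 1)).map Int.ofNat
  else
    let prev := pvColumnB (m / 2) (n - 1)
    (List.range' n (m + 1 - n)).foldl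
      (fun col i => col.setIfInBounds i (col.getD (i - 1) 0 + prev.getD (i / 2) 0))
      (Array.replicate (m + 1) (0 : Int))
  termination_by n
  decreasing_by omega

-- Literal port of B (Source B): the guard, then _column(m, n)[m].
def numberSequence_alt (m : Int) (n : Int) : Int :=
  if m ≤ 0 ∨ n ≤ 0 then 0
  else (pvColumnB m.toNat n.toNat).getD m.toNat 0

-- ===== PRECONDITION & SPEC =====
-- Pre_ excludes exactly m < 0 or n < 0, where A raises IndexError (dp[m][n] on an empty table/row).
def Pre_numberSequence (m : Int) (n : Int) : Prop := 0 ≤ m ∧ 0 ≤ n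
instance (m : Int) (n : Int) : Decidable (Pre_numberSequence m n) := by unfold Pre_numberSequence; infer_instance

def pvWitness_numberSequence : Int × Int := (5, 2)

def Spec_numberSequence (m : Int) (n : Int) (out : Int) : Prop := out = numberSequence_alt m n
instance (m : Int) (n : Int) (out : Int) : Decidable (Spec_numberSequence m n out) := by
  unfold Spec_numberSequence; infer_instance

-- ===== CLAIM (what is proved, stated in full; the proofs are below) =====
def Claim_equal_numberSequence : Prop := ∀ (m : Int) (n : Int), Dom_numberSequence m n →
  Pre_numberSequence m n → Spec_numberSequence m n (numberSequence m n)

-- ===== LEMMAS AND PROOFS =====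

-- The common specification of both ports: the recurrence both programs compute.
def fAlt (i j : Nat) : Int :=
  if i = 0 ∨ j = 0 ∨ i < j then 0
  else if j = 1 then (i : Int)
  else fAlt (i - 1) j + fAlt (i / 2) (j - 1)
  termination_by (j, i)
  decreasing_by
  · apply Prod.Lex.right' <;> omega
  · apply Prod.Lex.left; omega

theorem fAlt_zero_of (i j : Nat) (h : i = 0 ∨ j = 0 ∨ i < j) : fAlt i j = 0 := by
  rw [fAlt, if_pos h]

theorem fAlt_one (i : Nat) : fAlt i 1 = (i : Int) := by
  rw [fAlt]
  rcases Nat.eq_zero_or_pos i with h | h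
  · simp [h]
  · rw [if_neg (by omega), if_pos rfl]

-- The recurrence holds unconditionally for i ≥ 1, j ≥ 2: in the forced-zero region i < j
-- both summands are themselves in a zero region.
theorem fAlt_rec (i j : Nat) (hi : 1 ≤ i) (hj : 2 ≤ j) :
    fAlt i j = fAlt (i - 1) j + fAlt (i / 2) (j - 1) := by
  by_cases h : i < j
  · rw [fAlt_zero_of i j (by omega), fAlt_zero_of (i - 1) j (by omega),
        fAlt_zero_of (i / 2) (j - 1) (by omega)]
    simp
  · conv_lhs => rw [fAlt]
    rw [if_neg (by omega), if_neg (by omega)]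

-- ---- Array ↔ List bridges shared by both ports ----

theorem pv_getD_toList {α : Type} (a : Array α) (i : Nat) (d : α) :
    a.toList.getD i d = a.getD i d := by
  rw [Array.getD_eq_getD_getElem?, ← Array.getElem?_toList, List.getD_eq_getElem?_getD]

theorem pv_getD_map_range {α : Type} (f : Nat → α) (L i : Nat) (d : α) :
    ((List.range L).map f).getD i d = if i < L then f i else d := by
  by_cases h : i < L
  · rw [if_pos h, List.getD_eq_getElem _ _ (by simpa using h)]
    simp
  · rw [if_neg h]
    exact List.getD_eq_default _ _ (by simpa using h)

-- ---- A-side: the loop invariant over the List image of A's table ----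

-- List-level image of A's cell computation.
def pvCellL (dp : List (List Int)) (i j : Nat) : Int :=
  if i = 0 ∨ j = 0 ∨ i < j then 0
  else if j = 1 then (i : Int)
  else (dp.getD (i - 1) []).getD j 0 + (dp.getD (i / 2) []).getD (j - 1) 0

def pvAbs (dp : Array (Array Int)) : List (List Int) := dp.toList.map Array.toList

theorem pv_abs_getD (dp : Array (Array Int)) (i : Nat) :
    (pvAbs dp).getD i [] = (dp.getD i #[]).toList := by
  unfold pvAbs
  rw [Array.getD_eq_getD_getElem?, ← Array.getElem?_toList, List.getD_eq_getElem?_getD,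
      List.getElem?_map]
  rcases dp.toList[i]? with _ | r <;> rfl

theorem pv_cell_abs (dp : Array (Array Int)) (i j : Nat) :
    pvCellA dp i j = pvCellL (pvAbs dp) i j := by
  unfold pvCellA pvCellL
  rw [pv_abs_getD, pv_abs_getD, pv_getD_toList, pv_getD_toList]

theorem pv_abs_step (dp : Array (Array Int)) (i j : Nat) (v : Int) :
    pvAbs (dp.modify i (fun row => row.setIfInBounds j v))
      = (pvAbs dp).modify i (fun row => row.set j v) := by
  unfold pvAbs
  rw [Array.toList_modify]
  apply List.ext_getElem
  · simp
  · intro t h1 h2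
    simp only [List.getElem_map, List.getElem_modify]
    split_ifs with h
    · rw [Array.toList_setIfInBounds]
    · rfl

-- A's inner loop over the Array table, mirrored on its List image.
theorem pv_abs_inner (k : Nat) :
    ∀ (l : List Nat) (dp : Array (Array Int)),
      pvAbs (l.foldl (fun dp j =>
          let v := pvCellA dp k j
          dp.modify k (fun row => row.setIfInBounds j v)) dp)
        = l.foldl (fun dp j => dp.modify k (fun row => row.set j (pvCellL dp k j))) (pvAbs dp) := by
  intro l
  induction l with
  | nil => intro dp; rfl
  | cons j t ih =>
      intro dp
      simp only [List.foldl_cons]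
      rw [ih, pv_cell_abs, pv_abs_step]

theorem pv_abs_outer (N : Nat) :
    ∀ (l : List Nat) (dp : Array (Array Int)),
      pvAbs (l.foldl (fun dp i =>
          (List.range (N + 1)).foldl (fun dp j =>
              let v := pvCellA dp i j
              dp.modify i (fun row => row.setIfInBounds j v)) dp) dp)
        = l.foldl (fun dp i =>
            (List.range (N + 1)).foldl
              (fun dp j => dp.modify i (fun row => row.set j (pvCellL dp i j))) dp) (pvAbs dp) := by
  intro l
  induction l with
  | nil => intro dp; rfl
  | cons i t ih =>
      intro dp
      simp only [List.foldl_cons]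
      rw [ih, pv_abs_inner]

-- The row of intended values and the all-zero row, for a fixed column bound N.
def pvZeroRow (N : Nat) : List Int := List.replicate (N + 1) 0
def pvFullRow (N i : Nat) : List Int := (List.range (N + 1)).map (fun j => fAlt i j)

-- The table state of A's loops: rows below k are finished, row k is r (in progress), the rest are zeros.
def pvT (M N k : Nat) (r : List Int) : List (List Int) :=
  (List.range (M + 1)).map (fun i => if i < k then pvFullRow N i else if i = k then r else pvZeroRow N)

theorem pv_getD_fullRow (N i j : Nat) (hj : j ≤ N) : (pvFullRow N i).getD j 0 = fAlt i j := by
  unfold pvFullRow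
  rw [pv_getD_map_range]
  simp [Nat.lt_succ_of_le hj]

theorem pv_getD_T_lt (M N k : Nat) (r : List Int) (i : Nat) (hi : i ≤ M) (hik : i < k) :
    (pvT M N k r).getD i [] = pvFullRow N i := by
  unfold pvT
  rw [pv_getD_map_range]
  simp [Nat.lt_succ_of_le hi, hik]

-- The cell value A computes at (k, j) only reads finished rows, and equals fAlt k j.
theorem pv_cell_T (M N k j : Nat) (r : List Int) (hk : k ≤ M) (hj : j ≤ N) :
    pvCellL (pvT M N k r) k j = fAlt k j := by
  unfold pvCellL
  rw [fAlt]
  by_cases hbase : k = 0 ∨ j = 0 ∨ k < j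
  · simp [hbase]
  · simp only [if_neg hbase]
    by_cases hj1 : j = 1
    · simp [hj1]
    · simp only [if_neg hj1]
      have hk2 : 2 ≤ k := by omega
      rw [pv_getD_T_lt M N k r (k - 1) (by omega) (by omega),
          pv_getD_T_lt M N k r (k / 2) (by omega) (by omega),
          pv_getD_fullRow N (k - 1) j hj,
          pv_getD_fullRow N (k / 2) (j - 1) (by omega)]

-- Writing cell (k, j) in the state pvT M N k r updates only the working row r.
theorem pv_modify_T (M N k j : Nat) (r : List Int) (v : Int) :
    (pvT M N k r).modify k (fun row => row.set j v) = pvT M N k (r.set j v) := by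
  unfold pvT
  apply List.ext_getElem
  · simp
  · intro i h1 h2
    simp only [List.getElem_modify, List.getElem_map, List.getElem_range]
    by_cases hik : k = i
    · subst hik
      simp
    · simp only [if_neg hik, if_neg (show ¬ i = k from fun hh => hik hh.symm)]

-- A's inner loop over a list of column indices, on the invariant state.
theorem pv_inner_T (M N k : Nat) (hk : k ≤ M) :
    ∀ (l : List Nat), (∀ j ∈ l, j ≤ N) → ∀ r : List Int,
      l.foldl (fun dp j => dp.modify k (fun row => row.set j (pvCellL dp k j))) (pvT M N k r)
        = pvT M N k (l.foldl (fun r j => r.set j (fAlt k j)) r) := by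
  intro l
  induction l with
  | nil => intro _ r; rfl
  | cons j t ih =>
      intro hmem r
      have hj : j ≤ N := hmem j (List.mem_cons_self)
      simp only [List.foldl_cons]
      rw [pv_cell_T M N k j r hk hj, pv_modify_T M N k j r (fAlt k j)]
      exact ih (fun x hx => hmem x (List.mem_cons_of_mem _ hx)) _

-- Writing g j at every index j < L turns any list into the map of g (plus its untouched tail).
theorem pv_fold_set (g : Nat → Int) :
    ∀ (L : Nat) (r : List Int), L ≤ r.length →
      (List.range L).foldl (fun r j => r.set j (g j)) r = (List.range L).map g ++ r.drop L := by
  intro L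
  induction L with
  | zero => intro r _; simp
  | succ L ih =>
      intro r hL
      rw [List.range_succ, List.foldl_append, List.map_append, ih r (by omega)]
      simp only [List.foldl_cons, List.foldl_nil, List.map_cons, List.map_nil]
      have hlen : ((List.range L).map g).length = L := by simp
      rw [List.set_append_right _ _ (by omega)]
      have hdrop : r.drop L = r[L]'(by omega) :: r.drop (L + 1) := by
        rw [List.getElem_cons_drop]
      rw [hdrop]
      simp only [hlen, Nat.sub_self, List.set_cons_zero]
      rw [List.append_assoc]
      rfl

-- After A finishes row k it has exactly advanced the invariant to row k + 1.
theorem pv_advance (M N k : Nat) :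
    pvT M N k (pvFullRow N k) = pvT M N (k + 1) (pvZeroRow N) := by
  unfold pvT
  apply List.map_congr_left
  intro i _
  split_ifs <;> simp_all <;> omega

theorem pv_outer (M N : Nat) :
    ∀ (K : Nat), K ≤ M + 1 →
      (List.range K).foldl (fun dp i =>
          (List.range (N + 1)).foldl
            (fun dp j => dp.modify i (fun row => row.set j (pvCellL dp i j))) dp)
        (pvT M N 0 (pvZeroRow N))
        = pvT M N K (pvZeroRow N) := by
  intro K
  induction K with
  | zero => intro _; rfl
  | succ K ih =>
      intro hK
      have hr : List.range (K + 1) = List.range K ++ [K] := List.range_succ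
      rw [hr, List.foldl_append, ih (by omega)]
      simp only [List.foldl_cons, List.foldl_nil]
      rw [pv_inner_T M N K (by omega) (List.range (N + 1))
            (by intro j hj; simp at hj; omega) (pvZeroRow N)]
      rw [pv_fold_set (fun j => fAlt K j) (N + 1) (pvZeroRow N) (by simp [pvZeroRow])]
      have hdrop : (pvZeroRow N).drop (N + 1) = [] := by simp [pvZeroRow]
      rw [hdrop, List.append_nil]
      exact pv_advance M N K

theorem pv_init (M N : Nat) :
    pvAbs (Array.replicate (M + 1) (Array.replicate (N + 1) (0 : Int))) = pvT M N 0 (pvZeroRow N) := by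
  unfold pvAbs pvT pvZeroRow
  rw [Array.toList_replicate]
  apply List.ext_getElem
  · simp
  · intro i h1 h2
    simp only [List.getElem_map, List.getElem_replicate, List.getElem_range, Array.toList_replicate]
    split_ifs <;> simp_all

theorem pv_A_eq_fAlt (m n : Int) :
    numberSequence m n = fAlt m.toNat n.toNat := by
  unfold numberSequence
  rw [← pv_getD_toList, ← pv_abs_getD, pv_abs_outer n.toNat (List.range (m.toNat + 1)) _,
      pv_init m.toNat n.toNat, pv_outer m.toNat n.toNat (m.toNat + 1) (Nat.le_refl _),
      pv_getD_T_lt m.toNat n.toNat (m.toNat + 1) (pvZeroRow n.toNat) m.toNat (Nat.le_refl _) (by omega),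
      pv_getD_fullRow n.toNat m.toNat n.toNat (Nat.le_refl _)]

-- ---- B-side: the reachable-prefix column recursion ----

-- B's inner fold over the Array column, mirrored on its List image.
theorem pv_colB_abs (prev : Array Int) (l : List Nat) (col : Array Int) :
    (l.foldl (fun col i =>
        col.setIfInBounds i (col.getD (i - 1) 0 + prev.getD (i / 2) 0)) col).toList
      = l.foldl (fun col i =>
          col.set i (col.getD (i - 1) 0 + prev.toList.getD (i / 2) 0)) col.toList := by
  induction l generalizing col with
  | nil => rfl
  | cons i t ih =>
      simp only [List.foldl_cons]
      rw [ih]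
      congr 1
      rw [Array.toList_setIfInBounds, pv_getD_toList, pv_getD_toList]

-- The partially filled column: entries below n + k are final, the rest are still zero.
-- (fAlt t n = 0 for t < n, so the finished prefix is just fAlt.)
theorem pv_colB_loop (m n : Nat) (hn : 2 ≤ n) (hm : n ≤ m) (prevL : List Int)
    (hprev : ∀ t, t ≤ m / 2 → prevL.getD t 0 = fAlt t (n - 1)) :
    ∀ (k : Nat), k ≤ m + 1 - n →
      (List.range' n k).foldl (fun col i => col.set i (col.getD (i - 1) 0 + prevL.getD (i / 2) 0))
          ((List.range (m + 1)).map (fun t => if t < n then fAlt t n else 0))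
        = (List.range (m + 1)).map (fun t => if t < n + k then fAlt t n else 0) := by
  intro k
  induction k with
  | zero => intro _; rfl
  | succ k ih =>
      intro hk
      rw [List.range'_concat, List.foldl_append, ih (by omega)]
      simp only [List.foldl_cons, List.foldl_nil]
      have harg : n + 1 * k = n + k := by omega
      rw [harg]
      have hprev' : prevL.getD ((n + k) / 2) 0 = fAlt ((n + k) / 2) (n - 1) :=
        hprev ((n + k) / 2) (by omega)
      have hget : ((List.range (m + 1)).map (fun t => if t < n + k then fAlt t n else 0)).getD
          (n + k - 1) 0 = fAlt (n + k - 1) n := by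
        rw [pv_getD_map_range, if_pos (by omega), if_pos (by omega)]
      rw [hget, hprev']
      have hrec : fAlt (n + k) n = fAlt (n + k - 1) n + fAlt ((n + k) / 2) (n - 1) :=
        fAlt_rec (n + k) n (by omega) hn
      rw [← hrec]
      apply List.ext_getElem
      · simp
      · intro t h1 h2
        simp only [List.length_set, List.length_map, List.length_range] at h1
        rw [List.getElem_set]
        simp only [List.getElem_map, List.getElem_range]
        by_cases ht : n + k = t
        · rw [if_pos ht, if_pos (by omega), ← ht]
        · rw [if_neg ht]
          by_cases h3 : t < n + k
          · rw [if_pos h3, if_pos (by omega)]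
          · rw [if_neg h3, if_neg (by omega)]

-- B's column helper computes exactly fAlt · n on 0..m.
theorem pv_colB_eq (n : Nat) : ∀ (m : Nat), 1 ≤ n →
    (pvColumnB m n).toList = (List.range (m + 1)).map (fun i => fAlt i n) := by
  induction n with
  | zero => intro m h; omega
  | succ n ih =>
      intro m _
      rw [pvColumnB.eq_def]
      rw [if_neg (by omega)]
      by_cases h1 : m < n + 1
      · rw [if_pos h1, Array.toList_replicate]
        apply List.ext_getElem
        · simp
        · intro t ht1 ht2
          simp only [List.getElem_replicate, List.getElem_map, List.getElem_range]
          rw [fAlt_zero_of t (n + 1) (by simp only [List.length_replicate] at ht1; omega)]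
      · rw [if_neg h1]
        by_cases h2 : n + 1 = 1
        · rw [if_pos h2, h2]
          simp only [Array.toList_map, Array.toList_range]
          apply List.map_congr_left
          intro i _
          exact (fAlt_one i).symm
        · rw [if_neg h2]
          simp only
          rw [pv_colB_abs]
          have hprev := ih (m / 2) (by omega)
          have hzero : (Array.replicate (m + 1) (0 : Int)).toList
              = (List.range (m + 1)).map (fun t => if t < n + 1 then fAlt t (n + 1) else 0) := by
            rw [Array.toList_replicate]
            apply List.ext_getElem
            · simp
            · intro t ht1 ht2
              simp only [List.getElem_replicate, List.getElem_map, List.getElem_range]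
              by_cases h3 : t < n + 1
              · rw [if_pos h3, fAlt_zero_of t (n + 1) (by omega)]
              · rw [if_neg h3]
          rw [hzero]
          simp only [Nat.add_sub_cancel]
          rw [pv_colB_loop m (n + 1) (by omega) (by omega) (pvColumnB (m / 2) n).toList
                (by
                  intro t ht
                  rw [hprev, pv_getD_map_range, if_pos (by omega)]
                  simp)
                (m + 1 - (n + 1)) (Nat.le_refl _)]
          apply List.map_congr_left
          intro i hi
          simp only [List.mem_range] at hi
          rw [if_pos (by omega)]

theorem pv_B_eq_fAlt (m n : Int) (hm : 0 < m) (hn : 0 < n) :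
    numberSequence_alt m n = fAlt m.toNat n.toNat := by
  unfold numberSequence_alt
  rw [if_neg (by omega), ← pv_getD_toList, pv_colB_eq n.toNat m.toNat (by omega),
      pv_getD_map_range, if_pos (by omega)]

-- ===== VERDICT (by name: the statement is the Claim_ definition above) =====
theorem numberSequence_spec : Claim_equal_numberSequence := by
  intro m n _ hpre
  obtain ⟨hm, hn⟩ := hpre
  unfold Spec_numberSequence
  rw [pv_A_eq_fAlt m n]
  by_cases h : m ≤ 0 ∨ n ≤ 0
  · rw [fAlt_zero_of m.toNat n.toNat (by omega)]
    unfold numberSequence_alt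
    rw [if_pos h]
  · rw [pv_B_eq_fAlt m n (by omega) (by omega)]
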